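-- pv_equiv track=rewrite | github.com/ceasermikes002/thorax-spoon-os | app/services/abi_service.py | _identify_vectors_from_abi
-- ===== SOURCE A (Python) =====
-- from typing import Any, Dict, List
--
-- def _identify_vectors_from_abi(abi: Dict[str, Any]) -> List[str]:
--     methods = [m.get("name", "").lower() for m in (abi.get("methods") or [])]
--     vectors: List[str] = []
--     if any("mint" in n for n in methods):
--         vectors.append("unlimited_minting")
--     if any("pause" in n for n in methods):
--         vectors.append("contract_pause")
--     if any("freeze" in n for n in methods):
--         vectors.append("address_freezing")
--     if any("transfer" in n and "owner" in n for n in methods):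
--         vectors.append("ownership_takeover")
--     if any("destroy" in n or "kill" in n for n in methods):
--         vectors.append("contract_destruction")
--     if any("upgrade" in n or "upgradeto" in n or "setimplementation" in n for n in methods):
--         vectors.append("unchecked_upgrade_risk")
--     return vectors if vectors else ["standard_contract_risks"]
-- ===== SOURCE B (Python) =====
-- from typing import Any, Dict, List
--
-- def _identify_vectors_from_abi(abi: Dict[str, Any]) -> List[str]:
--     mint = pause = freeze = own = destroy = upgrade = False
--     for m in (abi.get("methods") or []):
--         n = m.get("name", "").lower()
--         mint = mint or "mint" in n
--         pause = pause or "pause" in n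
--         freeze = freeze or "freeze" in n
--         own = own or ("transfer" in n and "owner" in n)
--         destroy = destroy or "destroy" in n or "kill" in n
--         upgrade = upgrade or "upgrade" in n or "upgradeto" in n or "setimplementation" in n
--     labels = ["unlimited_minting", "contract_pause", "address_freezing",
--               "ownership_takeover", "contract_destruction", "unchecked_upgrade_risk"]
--     flags = [mint, pause, freeze, own, destroy, upgrade]
--     vectors = [lab for lab, f in zip(labels, flags) if f]
--     return vectors or ["standard_contract_risks"]
-- ===== Notes on version B (the rewrite author's own statement) =====
-- stated objective: simpler
-- what changed: B replaces A's list comprehension plus six separate any-scans over the method names with one pass that accumulates six boolean flags, then assembles the result by filtering a fixed label list against the flags.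
import Mathlib
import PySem

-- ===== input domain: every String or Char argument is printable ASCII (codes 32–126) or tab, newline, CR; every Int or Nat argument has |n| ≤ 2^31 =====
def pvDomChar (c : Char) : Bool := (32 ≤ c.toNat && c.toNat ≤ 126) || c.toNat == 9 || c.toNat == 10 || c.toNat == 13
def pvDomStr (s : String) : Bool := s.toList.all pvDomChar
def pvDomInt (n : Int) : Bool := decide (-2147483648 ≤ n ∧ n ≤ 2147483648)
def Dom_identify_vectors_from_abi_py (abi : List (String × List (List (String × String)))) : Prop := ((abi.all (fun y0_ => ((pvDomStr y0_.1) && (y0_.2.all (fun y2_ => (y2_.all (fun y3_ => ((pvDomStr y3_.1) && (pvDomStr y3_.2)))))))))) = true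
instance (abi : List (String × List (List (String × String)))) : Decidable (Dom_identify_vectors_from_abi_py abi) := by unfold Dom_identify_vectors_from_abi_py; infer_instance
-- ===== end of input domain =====

-- B replaces A's six separate any-scans over the method names with one accumulating
-- pass of six boolean flags plus a label-filter step (objective: simpler).

-- ===== PORT A =====
def identify_vectors_from_abi_py (abi : List (String × List (List (String × String)))) : List String :=
  let methods := ((PySem.Dict.get? (PySem.Dict.mk abi) "methods").getD []).map
    (fun m => PySem.Str.lower (PySem.Dict.getD (PySem.Dict.mk m) "name" ""))
  let vectors : List String := []
  let vectors := if methods.any (fun n => PySem.Str.isIn "mint" n) then vectors ++ ["unlimited_minting"] else vectors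
  let vectors := if methods.any (fun n => PySem.Str.isIn "pause" n) then vectors ++ ["contract_pause"] else vectors
  let vectors := if methods.any (fun n => PySem.Str.isIn "freeze" n) then vectors ++ ["address_freezing"] else vectors
  let vectors := if methods.any (fun n => PySem.Str.isIn "transfer" n && PySem.Str.isIn "owner" n) then vectors ++ ["ownership_takeover"] else vectors
  let vectors := if methods.any (fun n => PySem.Str.isIn "destroy" n || PySem.Str.isIn "kill" n) then vectors ++ ["contract_destruction"] else vectors
  let vectors := if methods.any (fun n => PySem.Str.isIn "upgrade" n || PySem.Str.isIn "upgradeto" n || PySem.Str.isIn "setimplementation" n) then vectors ++ ["unchecked_upgrade_risk"] else vectors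
  if vectors = [] then ["standard_contract_risks"] else vectors

-- ===== PORT B =====
def pvLName (m : List (String × String)) : String :=
  PySem.Str.lower (PySem.Dict.getD (PySem.Dict.mk m) "name" "")

def pvStep (st : Bool × Bool × Bool × Bool × Bool × Bool) (m : List (String × String)) :
    Bool × Bool × Bool × Bool × Bool × Bool :=
  let n := pvLName m
  (st.1 || PySem.Str.isIn "mint" n,
   st.2.1 || PySem.Str.isIn "pause" n,
   st.2.2.1 || PySem.Str.isIn "freeze" n,
   st.2.2.2.1 || (PySem.Str.isIn "transfer" n && PySem.Str.isIn "owner" n),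
   st.2.2.2.2.1 || PySem.Str.isIn "destroy" n || PySem.Str.isIn "kill" n,
   st.2.2.2.2.2 || PySem.Str.isIn "upgrade" n || PySem.Str.isIn "upgradeto" n || PySem.Str.isIn "setimplementation" n)

def identify_vectors_from_abi_py_alt (abi : List (String × List (List (String × String)))) : List String :=
  let fl := ((PySem.Dict.get? (PySem.Dict.mk abi) "methods").getD []).foldl pvStep
              (false, false, false, false, false, false)
  let labels := ["unlimited_minting", "contract_pause", "address_freezing",
                 "ownership_takeover", "contract_destruction", "unchecked_upgrade_risk"]
  let flags := [fl.1, fl.2.1, fl.2.2.1, fl.2.2.2.1, fl.2.2.2.2.1, fl.2.2.2.2.2]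
  let vectors := (labels.zip flags).filterMap (fun p => if p.2 then some p.1 else none)
  if vectors = [] then ["standard_contract_risks"] else vectors

-- ===== PRECONDITION & SPEC =====
def Spec_identify_vectors_from_abi_py (abi : List (String × List (List (String × String)))) (out : List String) : Prop := out = identify_vectors_from_abi_py_alt abi
instance (abi : List (String × List (List (String × String)))) (out : List String) : Decidable (Spec_identify_vectors_from_abi_py abi out) := by unfold Spec_identify_vectors_from_abi_py; infer_instance

-- ===== CLAIM (what is proved, stated in full; the proofs are below) =====
def Claim_equal_identify_vectors_from_abi_py : Prop := ∀ (abi : List (String × List (List (String × String)))), Dom_identify_vectors_from_abi_py abi → Spec_identify_vectors_from_abi_py abi (identify_vectors_from_abi_py abi)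

-- ===== LEMMAS AND PROOFS =====

theorem pvFoldl_pvStep (ms : List (List (String × String)))
    (st : Bool × Bool × Bool × Bool × Bool × Bool) :
    ms.foldl pvStep st =
      (st.1 || ms.any (fun m => PySem.Str.isIn "mint" (pvLName m)),
       st.2.1 || ms.any (fun m => PySem.Str.isIn "pause" (pvLName m)),
       st.2.2.1 || ms.any (fun m => PySem.Str.isIn "freeze" (pvLName m)),
       st.2.2.2.1 || ms.any (fun m => PySem.Str.isIn "transfer" (pvLName m) && PySem.Str.isIn "owner" (pvLName m)),
       st.2.2.2.2.1 || ms.any (fun m => PySem.Str.isIn "destroy" (pvLName m) || PySem.Str.isIn "kill" (pvLName m)),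
       st.2.2.2.2.2 || ms.any (fun m => PySem.Str.isIn "upgrade" (pvLName m) || PySem.Str.isIn "upgradeto" (pvLName m) || PySem.Str.isIn "setimplementation" (pvLName m))) := by
  induction ms generalizing st with
  | nil => simp
  | cons m ms ih =>
    simp only [List.foldl_cons, ih, pvStep, List.any_cons]
    cases st with
    | mk a r =>
      obtain ⟨b, c, d, e, f⟩ := r
      simp [Bool.or_assoc]

-- ===== VERDICT (by name: the statement is the Claim_ definition above) =====
theorem identify_vectors_from_abi_py_spec : Claim_equal_identify_vectors_from_abi_py := by
  intro abi _
  unfold Spec_identify_vectors_from_abi_py identify_vectors_from_abi_py identify_vectors_from_abi_py_alt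
  simp only [pvFoldl_pvStep, Bool.false_or, List.any_map, Function.comp_def, pvLName]
  set ms := (PySem.Dict.get? (PySem.Dict.mk abi) "methods").getD [] with hms
  generalize ms.any (fun m => PySem.Str.isIn "mint" (PySem.Str.lower ((PySem.Dict.mk m).getD "name" ""))) = b1
  generalize ms.any (fun m => PySem.Str.isIn "pause" (PySem.Str.lower ((PySem.Dict.mk m).getD "name" ""))) = b2
  generalize ms.any (fun m => PySem.Str.isIn "freeze" (PySem.Str.lower ((PySem.Dict.mk m).getD "name" ""))) = b3
  generalize ms.any (fun m => PySem.Str.isIn "transfer" (PySem.Str.lower ((PySem.Dict.mk m).getD "name" "")) && PySem.Str.isIn "owner" (PySem.Str.lower ((PySem.Dict.mk m).getD "name" ""))) = b4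
  generalize ms.any (fun m => PySem.Str.isIn "destroy" (PySem.Str.lower ((PySem.Dict.mk m).getD "name" "")) || PySem.Str.isIn "kill" (PySem.Str.lower ((PySem.Dict.mk m).getD "name" ""))) = b5
  generalize ms.any (fun m => PySem.Str.isIn "upgrade" (PySem.Str.lower ((PySem.Dict.mk m).getD "name" "")) || PySem.Str.isIn "upgradeto" (PySem.Str.lower ((PySem.Dict.mk m).getD "name" "")) || PySem.Str.isIn "setimplementation" (PySem.Str.lower ((PySem.Dict.mk m).getD "name" ""))) = b6
  cases b1 <;> cases b2 <;> cases b3 <;> cases b4 <;> cases b5 <;> cases b6 <;> rfl
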